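-- pv_equiv track=rewrite | github.com/gatorbacon/wrestledata-simple | scripts/process_raw_matches_by_season.py | parse_name_team
-- ===== SOURCE A (Python) =====
-- def parse_name_team(segment):
--     segment = segment.strip()
--     if not segment.endswith(")"):
--         return segment or "Unknown", "Unknown"
--     index = len(segment) - 1
--     depth = 1
--     while index > 0:
--         index -= 1
--         if segment[index] == ")":
--             depth += 1
--         elif segment[index] == "(":
--             depth -= 1
--             if depth == 0:
--                 team = segment[index + 1:-1].strip()
--                 name = segment[:index].strip()
--                 return name or "Unknown", team or "Unknown"
--     return segment or "Unknown", "Unknown"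
-- ===== SOURCE B (Python) =====
-- def parse_name_team(segment):
--     segment = segment.strip()
--     if not segment.endswith(")"):
--         return segment or "Unknown", "Unknown"
--     stack = []
--     popped = None
--     for i, ch in enumerate(segment):
--         if ch == "(":
--             stack.append(i)
--         elif ch == ")":
--             popped = stack.pop() if stack else None
--     if popped is None:
--         return segment, "Unknown"
--     team = segment[popped + 1:-1].strip()
--     name = segment[:popped].strip()
--     return name or "Unknown", team or "Unknown"
-- ===== Notes on version B (the rewrite author's own statement) =====
-- stated objective: alternative
-- what changed: Replaces the backward depth-counting while loop that scans right-to-left from the trailing close-paren with a single left-to-right scan maintaining a stack of indices of unmatched open parentheses; the index popped at the final character gives the split point.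
import Mathlib
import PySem

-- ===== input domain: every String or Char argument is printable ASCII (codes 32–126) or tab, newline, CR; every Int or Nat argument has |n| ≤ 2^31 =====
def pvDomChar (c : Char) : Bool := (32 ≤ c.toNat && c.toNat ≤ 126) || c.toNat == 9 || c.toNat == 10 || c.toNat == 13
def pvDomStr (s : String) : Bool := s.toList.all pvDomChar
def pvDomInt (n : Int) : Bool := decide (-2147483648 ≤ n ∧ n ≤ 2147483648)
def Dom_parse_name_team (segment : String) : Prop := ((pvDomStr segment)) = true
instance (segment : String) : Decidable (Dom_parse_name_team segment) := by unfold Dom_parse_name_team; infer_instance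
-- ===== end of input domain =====

-- B replaces A's backward depth-counting loop by a forward scan with a stack of indices of
-- unmatched open parens (idiomatic bracket matching); same return value everywhere.

-- ===== PORT A =====
-- A's while loop: index counts down from len-1, depth starts at 1; returns the index of
-- the '(' matching the final ')' (none = loop fell through). Every access segment[index]
-- has 0 ≤ index < len, so List.getD is exact here.
def pvALoop (cs : List Char) : Nat → Int → Option Nat
  | 0, _ => none
  | i + 1, depth =>
    let c := cs.getD i ' '
    if c = ')' then pvALoop cs i (depth + 1)
    else if c = '(' then
      if depth - 1 = 0 then some i else pvALoop cs i (depth - 1)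
    else pvALoop cs i depth

def parse_name_team (segment : String) : String × String :=
  let s := PySem.Str.strip segment
  if ¬ (PySem.Str.endswith s ")" = true) then
    ((if s = "" then "Unknown" else s), "Unknown")
  else
    match pvALoop s.toList (s.toList.length - 1) 1 with
    | some i =>
      let team := PySem.Str.strip (PySem.Str.slice s (some ((i : Int) + 1)) (some (-1)))
      let name := PySem.Str.strip (PySem.Str.slice s none (some (i : Int)))
      ((if name = "" then "Unknown" else name), (if team = "" then "Unknown" else team))
    | none => ((if s = "" then "Unknown" else s), "Unknown")

-- ===== PORT B =====
-- B's loop body: state = (stack of indices of unmatched '(', last popped index).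
def pvBStep (st : List Int × Option Int) (p : Int × Char) : List Int × Option Int :=
  if p.2 = '(' then (p.1 :: st.1, st.2)
  else if p.2 = ')' then (st.1.tail, st.1.head?)
  else st

def parse_name_team_alt (segment : String) : String × String :=
  let s := PySem.Str.strip segment
  if ¬ (PySem.Str.endswith s ")" = true) then
    ((if s = "" then "Unknown" else s), "Unknown")
  else
    let r := (PySem.List.enumerate s.toList 0).foldl pvBStep ([], none)
    match r.2 with
    | none => (s, "Unknown")
    | some i =>
      let team := PySem.Str.strip (PySem.Str.slice s (some (i + 1)) (some (-1)))
      let name := PySem.Str.strip (PySem.Str.slice s none (some i))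
      ((if name = "" then "Unknown" else name), (if team = "" then "Unknown" else team))

-- ===== PRECONDITION & SPEC =====
def Spec_parse_name_team (segment : String) (out : String × String) : Prop := out = parse_name_team_alt segment
instance (segment : String) (out : String × String) : Decidable (Spec_parse_name_team segment out) := by unfold Spec_parse_name_team; infer_instance

-- ===== CLAIM (what is proved, stated in full; the proofs are below) =====
def Claim_equal_parse_name_team : Prop := ∀ (segment : String), Dom_parse_name_team segment → Spec_parse_name_team segment (parse_name_team segment)

-- ===== LEMMAS AND PROOFS =====

/-- The stack component of B's fold, on its own. -/
def pvStack (l : List (Int × Char)) (st : List Int) : List Int :=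
  l.foldl (fun st p => if p.2 = '(' then p.1 :: st else if p.2 = ')' then st.tail else st) st

theorem pvBStep_fst (l : List (Int × Char)) (st : List Int) (p : Option Int) :
    (l.foldl pvBStep (st, p)).1 = pvStack l st := by
  induction l generalizing st p with
  | nil => rfl
  | cons q l ih =>
    simp only [List.foldl_cons, pvStack, pvBStep]
    split_ifs <;> simpa [pvStack] using ih _ _

/-- Core invariant: A's backward scan from position k with depth d finds the (d-1)-th
entry (from the top) of the forward stack built over the first k characters. -/
theorem pvALoop_eq_stack (cs : List Char) (k : Nat) (hk : k ≤ cs.length)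
    (d : Int) (hd : 1 ≤ d) :
    (pvALoop cs k d).map (Nat.cast : Nat → Int)
      = (pvStack (PySem.List.enumerate (cs.take k) 0) [])[(d - 1).toNat]? := by
  induction k generalizing d with
  | zero => simp [pvALoop, pvStack]
  | succ k ih =>
    have hklt : k < cs.length := hk
    have htake : cs.take (k + 1) = cs.take k ++ [cs[k]] := by
      rw [List.take_add_one]; simp [List.getElem?_eq_getElem hklt]
    have hlen : (cs.take k).length = k := List.length_take_of_le (le_of_lt hklt)
    have henum : PySem.List.enumerate (cs.take (k + 1)) 0
        = PySem.List.enumerate (cs.take k) 0 ++ [((k : Int), cs[k])] := by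
      rw [htake, PySem.List.enumerate_append]
      simp [hlen, PySem.List.enumerate_cons, PySem.List.enumerate_nil]
    have hget : cs[k]? = some cs[k] := List.getElem?_eq_getElem hklt
    rw [henum]
    unfold pvStack
    rw [List.foldl_append]
    show (pvALoop cs (k + 1) d).map _ = (if cs[k] = '(' then (k : Int) :: pvStack (PySem.List.enumerate (cs.take k) 0) []
        else if cs[k] = ')' then (pvStack (PySem.List.enumerate (cs.take k) 0) []).tail
        else pvStack (PySem.List.enumerate (cs.take k) 0) [])[(d - 1).toNat]?
    by_cases hpar : cs[k] = ')'
    · have h1 : pvALoop cs (k + 1) d = pvALoop cs k (d + 1) := by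
        simp [pvALoop, List.getD, hget, hpar]
      have hne : ¬ (cs[k] = '(') := by rw [hpar]; decide
      rw [h1, ih (le_of_lt hklt) (d + 1) (by omega), if_neg hne, if_pos hpar,
        List.getElem?_tail]
      congr 1
      omega
    · by_cases hopen : cs[k] = '('
      · rw [if_pos hopen]
        by_cases hd1 : d = 1
        · have h1 : pvALoop cs (k + 1) d = some k := by
            simp [pvALoop, List.getD, hget, hopen, hd1]
          rw [h1]
          simp [hd1]
        · have h1 : pvALoop cs (k + 1) d = pvALoop cs k (d - 1) := by
            have h2 : ¬ (d - 1 = 0) := by omega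
            simp [pvALoop, List.getD, hget, hopen, h2]
          rw [h1, ih (le_of_lt hklt) (d - 1) (by omega)]
          have h3 : (d - 1).toNat = (d - 1 - 1).toNat + 1 := by omega
          rw [h3, List.getElem?_cons_succ]
      · have h1 : pvALoop cs (k + 1) d = pvALoop cs k d := by
          simp [pvALoop, List.getD, hget, hpar, hopen]
        rw [h1, ih (le_of_lt hklt) d hd, if_neg hopen, if_neg hpar]

theorem parse_name_team_agree (segment : String) :
    parse_name_team segment = parse_name_team_alt segment := by
  unfold parse_name_team parse_name_team_alt
  generalize PySem.Str.strip segment = s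
  by_cases hend : PySem.Str.endswith s ")" = true
  · have hend' : PySem.Chars.endswith s.toList [')'] = true := by
      have he : (")" : String).toList = [')'] := rfl
      rw [PySem.Str.endswith_eq, he] at hend
      exact hend
    obtain ⟨t, ht⟩ := (PySem.Chars.endswith_iff s.toList [')']).mp hend'
    have hne : s.toList ≠ [] := by rw [← ht]; simp
    have hsne : ¬ (s = "") := by
      intro h; rw [h] at hne; exact hne rfl
    have htake : s.toList.take (s.toList.length - 1) = t := by
      rw [← ht]; simp
    have hsplit : PySem.List.enumerate s.toList 0
        = PySem.List.enumerate t 0 ++ [((t.length : Int), ')')] := by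
      rw [← ht, PySem.List.enumerate_append]
      simp [PySem.List.enumerate_cons, PySem.List.enumerate_nil]
    have hr : ((PySem.List.enumerate s.toList 0).foldl pvBStep ([], none)).2
        = (pvStack (PySem.List.enumerate t 0) [])[0]? := by
      rw [hsplit, List.foldl_append]
      have h1 : ((PySem.List.enumerate t 0).foldl pvBStep (([] : List Int), (none : Option Int))).1
          = pvStack (PySem.List.enumerate t 0) [] := pvBStep_fst _ _ _
      rcases hfold : (PySem.List.enumerate t 0).foldl pvBStep (([] : List Int), (none : Option Int)) with ⟨st, p⟩
      rw [hfold] at h1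
      simp only [List.foldl_cons, List.foldl_nil, pvBStep]
      simp at h1
      simp [h1, List.head?_eq_getElem?]
    have ha : (pvALoop s.toList (s.toList.length - 1) 1).map (Nat.cast : Nat → Int)
        = (pvStack (PySem.List.enumerate t 0) [])[0]? := by
      have h2 := pvALoop_eq_stack s.toList (s.toList.length - 1)
        (Nat.sub_le _ _) 1 (by norm_num)
      rw [htake] at h2
      simpa using h2
    have hlenlist : s.toList.length = s.length := by simp
    rw [hlenlist] at ha
    rcases hA : pvALoop s.toList (s.length - 1) 1 with _ | i
    · have hB : ((PySem.List.enumerate s.toList 0).foldl pvBStep ([], none)).2 = none := by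
        rw [hr, ← ha, hA]; rfl
      simp [hend', hA, hB, hsne]
    · have hB : ((PySem.List.enumerate s.toList 0).foldl pvBStep ([], none)).2 = some (i : Int) := by
        rw [hr, ← ha, hA]; rfl
      simp [hend', hA, hB]
  · have hend' : PySem.Chars.endswith s.toList [')'] = false := by
      have he : (")" : String).toList = [')'] := rfl
      rw [PySem.Str.endswith_eq, he] at hend
      exact Bool.not_eq_true _ ▸ (Bool.eq_false_iff.mpr (fun h => hend h))
    simp [hend']

-- ===== VERDICT (by name: the statement is the Claim_ definition above) =====
theorem parse_name_team_spec : Claim_equal_parse_name_team := by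
  intro segment _
  exact parse_name_team_agree segment
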